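-- pv_equiv track=rewrite | github.com/nghiatt90/cs-practice | codelearn/leftrigthcipher.py | leftRigthCipher
-- ===== SOURCE A (Python) =====
-- def leftRigthCipher(s):
--     ans = []
--     s = list(s)
--     i = -1 if len(s)&1 == 0 else 0
--     while s:
--         ans.append(s.pop(i))
--         i = 0 if i else -1
--     return ''.join(ans[::-1])
-- ===== SOURCE B (Python) =====
-- def leftRigthCipher(s):
--     n = len(s)
--     m = n // 2
--     odd = n % 2
--     parts = [s[m]] if odd else []
--     for j in range(m - 1, -1, -1):
--         if odd:
--             parts.append(s[n - 1 - j])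
--             parts.append(s[j])
--         else:
--             parts.append(s[j])
--             parts.append(s[n - 1 - j])
--     return ''.join(parts)
-- ===== Notes on version B (the rewrite author's own statement) =====
-- stated objective: faster
-- what changed: Replaces the alternating s.pop(-1)/s.pop(0) loop (each pop(0) shifts the whole remaining list) plus a final reversal by a single middle-out loop that reads the characters by index and builds the result directly in output order.
import Mathlib
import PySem

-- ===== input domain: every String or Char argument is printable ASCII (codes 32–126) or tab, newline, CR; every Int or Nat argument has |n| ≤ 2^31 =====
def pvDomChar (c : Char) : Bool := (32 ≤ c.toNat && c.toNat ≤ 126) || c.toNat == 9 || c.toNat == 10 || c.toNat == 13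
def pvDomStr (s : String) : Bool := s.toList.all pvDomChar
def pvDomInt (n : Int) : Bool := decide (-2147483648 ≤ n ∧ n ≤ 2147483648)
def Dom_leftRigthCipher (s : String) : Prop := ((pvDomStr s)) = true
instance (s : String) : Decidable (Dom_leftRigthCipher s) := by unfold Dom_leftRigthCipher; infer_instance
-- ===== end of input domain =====

-- B replaces A's alternating list.pop loop (pop(0) shifts the whole list; plus a final
-- reversal) by a single direct middle-out index loop over j = m-1 .. 0.

-- ===== PORT A =====
-- while s: ans.append(s.pop(i)); i = 0 if i else -1
def leftRigthCipherLoop (s : List Char) (i : Int) (ans : List Char) : List Char :=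
  if _h : s = [] then ans
  else
    match h : PySem.List.pop? s i with
    | some (c, s') => leftRigthCipherLoop s' (if i ≠ 0 then 0 else -1) (ans ++ [c])
    | none => ans  -- unreachable: pop on a nonempty list succeeds for i ∈ {-1, 0}
termination_by s.length
decreasing_by have := PySem.List.length_of_pop?_eq_some s h; simp_all; omega

def leftRigthCipher (s : String) : String :=
  let sl := s.toList
  -- i = -1 if len(s)&1 == 0 else 0   (len(s)&1 is len(s) % 2)
  let i : Int := if sl.length % 2 = 0 then -1 else 0
  -- return ''.join(ans[::-1])
  String.ofList (leftRigthCipherLoop sl i []).reverse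

-- ===== PORT B =====
def leftRigthCipherAltCore (sl : List Char) : List Char :=
  let n : Int := sl.length
  let m : Int := PySem.Int.floordiv n 2
  let odd : Int := PySem.Int.mod n 2
  let parts0 : List Char := if odd ≠ 0 then [PySem.List.pyGetD sl m ' '] else []
  -- for j in range(m - 1, -1, -1): append the two characters for index j
  (PySem.List.pyRange (m - 1) (-1) (-1)).foldl
    (fun acc j =>
      if odd ≠ 0 then
        acc ++ [PySem.List.pyGetD sl (n - 1 - j) ' '] ++ [PySem.List.pyGetD sl j ' ']
      else
        acc ++ [PySem.List.pyGetD sl j ' '] ++ [PySem.List.pyGetD sl (n - 1 - j) ' ']) parts0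

def leftRigthCipher_alt (s : String) : String :=
  String.ofList (leftRigthCipherAltCore s.toList)

-- ===== PRECONDITION & SPEC =====
def Spec_leftRigthCipher (s : String) (out : String) : Prop := out = leftRigthCipher_alt s
instance (s : String) (out : String) : Decidable (Spec_leftRigthCipher s out) := by unfold Spec_leftRigthCipher; infer_instance

-- ===== CLAIM (what is proved, stated in full; the proofs are below) =====
def Claim_equal_leftRigthCipher : Prop := ∀ (s : String), Dom_leftRigthCipher s → Spec_leftRigthCipher s (leftRigthCipher s)

-- ===== LEMMAS AND PROOFS =====

def midSpec (l : List Char) : List Char :=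
  if _h : l.length < 2 then l
  else midSpec l.tail.dropLast ++
    (if l.length % 2 = 0 then [l.head!, l.getLast!] else [l.getLast!, l.head!])
termination_by l.length
decreasing_by simp [List.length_dropLast, List.length_tail]; omega

theorem midSpec_nil : midSpec [] = [] := by rw [midSpec]; simp

theorem midSpec_one (c : Char) : midSpec [c] = [c] := by rw [midSpec]; simp

theorem midSpec_pair (a z : Char) (mid : List Char) :
    midSpec (a :: mid ++ [z]) =
      midSpec mid ++ (if mid.length % 2 = 0 then [a, z] else [z, a]) := by
  rw [midSpec]
  have hl : (a :: (mid ++ [z])).getLast? = some z := by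
    rw [← List.cons_append]; exact List.getLast?_concat
  have hm : (mid.length + 1 + 1) % 2 = mid.length % 2 := by omega
  simp [hl, hm]


theorem loop_nil (i : Int) (ans : List Char) : leftRigthCipherLoop [] i ans = ans := by
  rw [leftRigthCipherLoop]; simp

theorem loop_cons_zero (c : Char) (s' ans : List Char) :
    leftRigthCipherLoop (c :: s') 0 ans = leftRigthCipherLoop s' (-1) (ans ++ [c]) := by
  rw [leftRigthCipherLoop]
  rw [dif_neg (by simp)]
  split
  · next c' s'' heq =>
      rw [PySem.List.pop?_zero_cons] at heq
      cases heq; simp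
  · next heq => rw [PySem.List.pop?_zero_cons] at heq; cases heq

theorem loop_concat_neg (z : Char) (s' ans : List Char) :
    leftRigthCipherLoop (s' ++ [z]) (-1) ans = leftRigthCipherLoop s' 0 (ans ++ [z]) := by
  rw [leftRigthCipherLoop]
  rw [dif_neg (by simp)]
  split
  · next c' s'' heq =>
      rw [PySem.List.pop?_last] at heq
      cases heq; simp
  · next heq => rw [PySem.List.pop?_last] at heq; cases heq

theorem loop_spec : ∀ (n : Nat) (l ans : List Char), l.length = n →
    leftRigthCipherLoop l (if n % 2 = 0 then -1 else 0) ans = ans ++ (midSpec l).reverse := by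
  intro n
  induction n using Nat.strong_induction_on with
  | _ n ih =>
    match n with
    | 0 =>
      intro l ans hlen
      rw [List.length_eq_zero_iff] at hlen
      subst hlen
      simp [loop_nil, midSpec_nil]
    | 1 =>
      intro l ans hlen
      rw [List.length_eq_one_iff] at hlen
      obtain ⟨c, rfl⟩ := hlen
      norm_num [loop_cons_zero, loop_nil, midSpec_one]
    | (k + 2) =>
      intro l ans hlen
      -- decompose l = a :: mid ++ [z]
      obtain ⟨a, t, rfl⟩ : ∃ a t, l = a :: t := by
        cases l with
        | nil => simp at hlen
        | cons a t => exact ⟨a, t, rfl⟩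
      have ht : t ≠ [] := by intro h; subst h; simp at hlen
      obtain ⟨mid, z, rfl⟩ : ∃ mid z, t = mid ++ [z] := by
        exact ⟨t.dropLast, t.getLast ht, (List.dropLast_append_getLast ht).symm⟩
      have hmid : mid.length = k := by simp at hlen; omega
      by_cases hp : (k + 2) % 2 = 0
      · have hpk : k % 2 = 0 := by omega
        rw [if_pos hp, ← List.cons_append, loop_concat_neg, loop_cons_zero,
            midSpec_pair, hmid, if_pos hpk]
        have := ih k (by omega) mid (ans ++ [z] ++ [a]) hmid
        rw [if_pos hpk] at this
        rw [this]
        simp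
      · have hpk : ¬ k % 2 = 0 := by omega
        rw [if_neg hp, loop_cons_zero, loop_concat_neg, ← List.cons_append,
            midSpec_pair, hmid, if_neg hpk]
        have := ih k (by omega) mid (ans ++ [a] ++ [z]) hmid
        rw [if_neg hpk] at this
        rw [this]
        simp

theorem altCore_def (sl : List Char) :
    leftRigthCipherAltCore sl =
      (PySem.List.pyRange (PySem.Int.floordiv (sl.length : Int) 2 - 1) (-1) (-1)).foldl
        (fun acc j =>
          if PySem.Int.mod (sl.length : Int) 2 ≠ 0 then
            acc ++ [PySem.List.pyGetD sl ((sl.length : Int) - 1 - j) ' ']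
                ++ [PySem.List.pyGetD sl j ' ']
          else
            acc ++ [PySem.List.pyGetD sl j ' ']
                ++ [PySem.List.pyGetD sl ((sl.length : Int) - 1 - j) ' '])
        (if PySem.Int.mod (sl.length : Int) 2 ≠ 0 then
          [PySem.List.pyGetD sl (PySem.Int.floordiv (sl.length : Int) 2) ' ']
        else []) := rfl

theorem fdiv2 (M : Nat) : PySem.Int.floordiv (M : Int) 2 = ((M / 2 : Nat) : Int) := by
  simp [PySem.Int.floordiv, Int.fdiv_eq_ediv]

theorem fmod2 (M : Nat) : PySem.Int.mod (M : Int) 2 = ((M % 2 : Nat) : Int) := by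
  simp [PySem.Int.mod, Int.fmod_eq_emod]

theorem getD_shift (a z : Char) (mid : List Char) (j : Int) (h0 : 0 ≤ j)
    (h1 : j < (mid.length : Int)) :
    PySem.List.pyGetD (a :: (mid ++ [z])) (j + 1) ' ' = PySem.List.pyGetD mid j ' ' := by
  rw [PySem.List.pyGetD_eq_getElem _ _ (by omega) (by simp; omega),
      PySem.List.pyGetD_eq_getElem _ _ h0 h1]
  have hj : (j + 1).toNat = j.toNat + 1 := by omega
  have hlt : j.toNat < mid.length := by omega
  simp [hj, hlt]

theorem getD_head (a z : Char) (mid : List Char) :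
    PySem.List.pyGetD (a :: (mid ++ [z])) 0 ' ' = a := by
  rw [PySem.List.pyGetD_eq_getElem _ _ (by omega) (by simp; omega)]
  simp

theorem getD_last (a z : Char) (mid : List Char) :
    PySem.List.pyGetD (a :: (mid ++ [z])) ((mid.length : Int) + 1) ' ' = z := by
  rw [PySem.List.pyGetD_eq_getElem _ _ (by omega) (by simp)]
  have : ((mid.length : Int) + 1).toNat = mid.length + 1 := by omega
  simp [this]

theorem altCore_step (a z : Char) (mid : List Char) :
    leftRigthCipherAltCore ((a :: mid) ++ [z]) =
      leftRigthCipherAltCore mid ++ (if mid.length % 2 = 0 then [a, z] else [z, a]) := by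
  have hlen : ((a :: mid) ++ [z]).length = mid.length + 2 := by simp
  rw [altCore_def, altCore_def, hlen]
  by_cases hp : mid.length % 2 = 0
  · have hm2 : (mid.length + 2) % 2 = 0 := by omega
    rw [fdiv2, fmod2, fdiv2, fmod2, hm2, hp]
    norm_num
    rw [PySem.List.pyRange_neg_one, PySem.List.pyRange_neg_one]
    have e1 : ((mid.length : Int) / 2 - -1).toNat = mid.length / 2 + 1 := by omega
    have e2 : ((mid.length : Int) / 2 - 1 - -1).toNat = mid.length / 2 := by omega
    rw [e1, e2, List.range_succ, List.map_append, List.map_append, List.flatten_append,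
        List.map_map, List.map_map]
    have hcong :
        List.map ((fun x2 =>
            [PySem.List.pyGetD (a :: (mid ++ [z])) x2 ' ',
              PySem.List.pyGetD (a :: (mid ++ [z])) ((mid.length : Int) + 2 - 1 - x2) ' ']) ∘
            (fun k : Nat => (mid.length : Int) / 2 - (k : Int))) (List.range (mid.length / 2)) =
        List.map ((fun x2 =>
            [PySem.List.pyGetD mid x2 ' ',
              PySem.List.pyGetD mid ((mid.length : Int) - 1 - x2) ' ']) ∘
            (fun k : Nat => (mid.length : Int) / 2 - 1 - (k : Int))) (List.range (mid.length / 2)) := by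
      apply List.map_congr_left
      intro k hk
      rw [List.mem_range] at hk
      simp only [Function.comp]
      have j1 : ((mid.length : Int) / 2 - (k : Int)) = ((mid.length : Int) / 2 - 1 - (k : Int)) + 1 := by omega
      have j2 : ((mid.length : Int) + 2 - 1 - ((mid.length : Int) / 2 - (k : Int)))
          = ((mid.length : Int) - (mid.length : Int) / 2 + (k : Int)) + 1 := by omega
      have j3 : ((mid.length : Int) - 1 - ((mid.length : Int) / 2 - 1 - (k : Int)))
          = (mid.length : Int) - (mid.length : Int) / 2 + (k : Int) := by omega
      rw [j2, j1, j3, getD_shift _ _ _ _ (by omega) (by omega),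
          getD_shift _ _ _ _ (by omega) (by omega)]
    rw [hcong, List.map_map]
    congr 1
    have i0 : ((mid.length : Int) / 2 - ((mid.length / 2 : Nat) : Int)) = 0 := by omega
    have i1 : ((mid.length : Int) + 2 - 1 - 0) = (mid.length : Int) + 1 := by omega
    simp only [List.map_cons, List.map_nil, Function.comp_apply, List.flatten_cons,
      List.flatten_nil, List.append_nil, i0, i1, getD_head, getD_last]
  · have hp1 : mid.length % 2 = 1 := by omega
    have hm2 : (mid.length + 2) % 2 = 1 := by omega
    rw [fdiv2, fmod2, fdiv2, fmod2, hm2, hp1]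
    norm_num
    rw [PySem.List.pyRange_neg_one, PySem.List.pyRange_neg_one]
    constructor
    · exact getD_shift a z mid _ (by omega) (by omega)
    · have e1 : ((mid.length : Int) / 2 - -1).toNat = mid.length / 2 + 1 := by omega
      have e2 : ((mid.length : Int) / 2 - 1 - -1).toNat = mid.length / 2 := by omega
      rw [e1, e2, List.range_succ, List.map_append, List.map_append, List.flatten_append,
          List.map_map, List.map_map]
      have hcong :
          List.map ((fun x2 =>
              [PySem.List.pyGetD (a :: (mid ++ [z])) ((mid.length : Int) + 2 - 1 - x2) ' ',
                PySem.List.pyGetD (a :: (mid ++ [z])) x2 ' ']) ∘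
              (fun k : Nat => (mid.length : Int) / 2 - (k : Int))) (List.range (mid.length / 2)) =
          List.map ((fun x2 =>
              [PySem.List.pyGetD mid ((mid.length : Int) - 1 - x2) ' ',
                PySem.List.pyGetD mid x2 ' ']) ∘
              (fun k : Nat => (mid.length : Int) / 2 - 1 - (k : Int))) (List.range (mid.length / 2)) := by
        apply List.map_congr_left
        intro k hk
        rw [List.mem_range] at hk
        simp only [Function.comp]
        have j1 : ((mid.length : Int) / 2 - (k : Int)) = ((mid.length : Int) / 2 - 1 - (k : Int)) + 1 := by omega
        have j2 : ((mid.length : Int) + 2 - 1 - ((mid.length : Int) / 2 - (k : Int)))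
            = ((mid.length : Int) - (mid.length : Int) / 2 + (k : Int)) + 1 := by omega
        have j3 : ((mid.length : Int) - 1 - ((mid.length : Int) / 2 - 1 - (k : Int)))
            = (mid.length : Int) - (mid.length : Int) / 2 + (k : Int) := by omega
        rw [j2, j1, j3, getD_shift _ _ _ _ (by omega) (by omega),
            getD_shift _ _ _ _ (by omega) (by omega)]
      rw [hcong, List.map_map]
      congr 1
      have i0 : ((mid.length : Int) / 2 - ((mid.length / 2 : Nat) : Int)) = 0 := by omega
      have i1 : ((mid.length : Int) + 2 - 1 - 0) = (mid.length : Int) + 1 := by omega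
      simp only [List.map_cons, List.map_nil, Function.comp_apply, List.flatten_cons,
        List.flatten_nil, List.append_nil, i0, i1, getD_head, getD_last]


theorem altCore_nil : leftRigthCipherAltCore [] = [] := by decide

theorem altCore_one (c : Char) : leftRigthCipherAltCore [c] = [c] := by
  rw [altCore_def]
  norm_num [fdiv2, fmod2, PySem.List.pyRange_neg_one_eq_nil]

theorem alt_spec : ∀ (n : Nat) (l : List Char), l.length = n →
    leftRigthCipherAltCore l = midSpec l := by
  intro n
  induction n using Nat.strong_induction_on with
  | _ n ih =>
    match n with
    | 0 =>
      intro l hlen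
      rw [List.length_eq_zero_iff] at hlen
      subst hlen
      rw [altCore_nil, midSpec_nil]
    | 1 =>
      intro l hlen
      rw [List.length_eq_one_iff] at hlen
      obtain ⟨c, rfl⟩ := hlen
      rw [altCore_one, midSpec_one]
    | (k + 2) =>
      intro l hlen
      obtain ⟨a, t, rfl⟩ : ∃ a t, l = a :: t := by
        cases l with
        | nil => simp at hlen
        | cons a t => exact ⟨a, t, rfl⟩
      have ht : t ≠ [] := by intro h; subst h; simp at hlen
      obtain ⟨mid, z, rfl⟩ : ∃ mid z, t = mid ++ [z] := by
        exact ⟨t.dropLast, t.getLast ht, (List.dropLast_append_getLast ht).symm⟩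
      have hmid : mid.length = k := by simp at hlen; omega
      rw [← List.cons_append, altCore_step, midSpec_pair, ih k (by omega) mid hmid]

-- ===== VERDICT (by name: the statement is the Claim_ definition above) =====
theorem leftRigthCipher_spec : Claim_equal_leftRigthCipher := by
  intro s _
  show String.ofList (leftRigthCipherLoop s.toList (if s.toList.length % 2 = 0 then -1 else 0) []).reverse = String.ofList (leftRigthCipherAltCore s.toList)
  rw [loop_spec s.toList.length s.toList [] rfl,
      alt_spec s.toList.length s.toList rfl]
  simp
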